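-- pv_equiv track=rewrite | github.com/JorenVdG00/Top_drives_bot | utils/text_utils.py | cut_until_integer
-- ===== SOURCE A (Python) =====
-- def cut_until_integer(s):
--     index = len(s)
--
--     # Iterate backward through the string
--     for i in range(len(s) - 1, -1, -1):
--         if s[i].isdigit():
--             index = i
--             break
--
--     # Slice the string up to and including the first integer
--     result = s[:index + 1]
--     return result
-- ===== SOURCE B (Python) =====
-- def cut_until_integer(s):
--     # single forward pass: remember the index of the last digit seen;
--     # fallback len(s) makes "no digit" return the whole string
--     last = len(s)
--     for i, ch in enumerate(s):
--         if ch.isdigit():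
--             last = i
--     return s[:last + 1]
-- ===== Notes on version B (the rewrite author's own statement) =====
-- stated objective: alternative
-- what changed: Replaces the backward scan with early break by a forward enumerate pass that records the index of the last digit seen (fallback len(s)), then slices once.
import Mathlib
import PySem

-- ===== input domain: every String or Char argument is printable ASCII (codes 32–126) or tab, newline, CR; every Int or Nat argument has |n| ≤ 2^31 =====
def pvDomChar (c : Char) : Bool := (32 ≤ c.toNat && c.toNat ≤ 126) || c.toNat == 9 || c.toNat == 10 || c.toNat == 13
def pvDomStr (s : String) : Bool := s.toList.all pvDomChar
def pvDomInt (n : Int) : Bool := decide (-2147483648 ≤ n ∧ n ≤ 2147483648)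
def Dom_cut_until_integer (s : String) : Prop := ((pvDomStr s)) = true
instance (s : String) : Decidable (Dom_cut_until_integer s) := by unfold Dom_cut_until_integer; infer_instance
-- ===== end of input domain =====

-- B replaces A's backward break-scan with a forward enumerate pass tracking the last digit index; same cost, different traversal.

-- ===== PORT A =====
-- the backward for-loop with break: scan the index list, return the first digit index, else the default
def cutLoopA (cs : List Char) (idxs : List Int) (index : Int) : Int :=
  match idxs with
  | [] => index
  | i :: rest =>
    if PySem.Chars.isdigit (PySem.List.pyGetD cs i ' ') then i
    else cutLoopA cs rest index

def cut_until_integer (s : String) : String :=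
  let cs := s.toList
  let index := cutLoopA cs (PySem.List.pyRange ((cs.length : Int) - 1) (-1) (-1)) (cs.length : Int)
  String.ofList (PySem.List.slice cs none (some (index + 1)))

-- ===== PORT B =====
def cut_until_integer_alt (s : String) : String :=
  let cs := s.toList
  let last := (PySem.List.enumerate cs).foldl
      (fun acc p => if PySem.Chars.isdigit p.2 then p.1 else acc) (cs.length : Int)
  String.ofList (PySem.List.slice cs none (some (last + 1)))

-- ===== PRECONDITION & SPEC =====
def Spec_cut_until_integer (s : String) (out : String) : Prop := out = cut_until_integer_alt s
instance (s : String) (out : String) : Decidable (Spec_cut_until_integer s out) := by unfold Spec_cut_until_integer; infer_instance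

-- ===== CLAIM (what is proved, stated in full; the proofs are below) =====
def Claim_equal_cut_until_integer : Prop := ∀ (s : String), Dom_cut_until_integer s → Spec_cut_until_integer s (cut_until_integer s)

-- ===== LEMMAS AND PROOFS =====

-- the common characterisation: position of the last digit (via findIdx? on the reverse), or the default
def lastDigitSpec (cs : List Char) (d : Int) : Int :=
  match cs.reverse.findIdx? (fun c => PySem.Chars.isdigit c) with
  | none => d
  | some k => ((cs.length - 1 - k : Nat) : Int)

-- A's loop ignores the appended character when the index list only reaches ds
lemma cutLoopA_append (ds : List Char) (c : Char) (idxs : List Int) (d : Int)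
    (h : ∀ i ∈ idxs, 0 ≤ i ∧ i < (ds.length : Int)) :
    cutLoopA (ds ++ [c]) idxs d = cutLoopA ds idxs d := by
  induction idxs with
  | nil => rfl
  | cons i rest ih =>
    obtain ⟨h0, hlt⟩ := h i (by simp)
    have : PySem.List.pyGetD (ds ++ [c]) i ' ' = PySem.List.pyGetD ds i ' ' := by
      rw [PySem.List.pyGetD_eq_getElem (ds ++ [c]) ' ' h0 (by simp; omega),
          PySem.List.pyGetD_eq_getElem ds ' ' h0 (by exact_mod_cast hlt),
          List.getElem_append_left (by omega)]
    simp only [cutLoopA, this]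
    split
    · rfl
    · exact ih (fun j hj => h j (List.mem_cons_of_mem _ hj))

lemma cutLoopA_spec (cs : List Char) (d : Int) :
    cutLoopA cs (PySem.List.pyRange ((cs.length : Int) - 1) (-1) (-1)) d = lastDigitSpec cs d := by
  induction cs using List.reverseRecOn with
  | nil => simp [cutLoopA, lastDigitSpec, PySem.List.pyRange_neg_one_eq_nil (le_refl (-1))]
  | append_singleton ds c ih =>
    have hcons : PySem.List.pyRange (((ds ++ [c]).length : Int) - 1) (-1) (-1)
        = (ds.length : Int) :: PySem.List.pyRange ((ds.length : Int) - 1) (-1) (-1) := by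
      have := PySem.List.pyRange_neg_one_cons (a := (ds.length : Int)) (b := -1) (by omega)
      simp only [List.length_append, List.length_cons, List.length_nil]
      push_cast
      simpa using this
    rw [hcons]
    have hget : PySem.List.pyGetD (ds ++ [c]) (ds.length : Int) ' ' = c := by
      rw [PySem.List.pyGetD_eq_getElem (ds ++ [c]) ' ' (by positivity) (by simp)]
      simp
    simp only [cutLoopA, hget]
    by_cases hc : PySem.Chars.isdigit c = true
    · simp [hc, lastDigitSpec, List.findIdx?_cons]
    · simp only [hc]
      rw [cutLoopA_append ds c _ d
          (fun i hi => by
            rw [PySem.List.mem_pyRange_neg_one] at hi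
            exact ⟨by omega, by omega⟩)]
      rw [ih]
      simp [lastDigitSpec, List.findIdx?_cons, hc]
      cases hfi : List.findIdx? (fun c => PySem.Chars.isdigit c) ds.reverse with
      | none => simp
      | some k =>
        have hk : k < ds.length := by
          have := List.findIdx?_eq_some_iff_findIdx_eq.mp hfi
          simp at this; omega
        simp
        omega

lemma foldl_enumerate_spec (cs : List Char) (s d : Int) :
    (PySem.List.enumerate cs s).foldl
      (fun acc p => if PySem.Chars.isdigit p.2 then p.1 else acc) d
    = match cs.reverse.findIdx? (fun c => PySem.Chars.isdigit c) with
      | none => d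
      | some k => s + ((cs.length - 1 - k : Nat) : Int) := by
  induction cs using List.reverseRecOn generalizing d with
  | nil => simp [PySem.List.enumerate]
  | append_singleton ds c ih =>
    rw [PySem.List.enumerate_append, List.foldl_append]
    simp only [PySem.List.enumerate, List.foldl]
    by_cases hc : PySem.Chars.isdigit c = true
    · simp [hc, List.findIdx?_cons]
    · simp only [hc]
      rw [ih]
      simp [List.findIdx?_cons, hc]
      cases hfi : List.findIdx? (fun c => PySem.Chars.isdigit c) ds.reverse with
      | none => simp
      | some k =>
        have hk : k < ds.length := by
          have := List.findIdx?_eq_some_iff_findIdx_eq.mp hfi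
          simp at this; omega
        simp
        omega

-- ===== VERDICT (by name: the statement is the Claim_ definition above) =====
theorem cut_until_integer_spec : Claim_equal_cut_until_integer := by
  intro s _
  show cut_until_integer s = cut_until_integer_alt s
  unfold cut_until_integer cut_until_integer_alt
  simp only
  rw [cutLoopA_spec, foldl_enumerate_spec]
  unfold lastDigitSpec
  cases List.findIdx? (fun c => PySem.Chars.isdigit c) s.toList.reverse <;> simp
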